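-- pv_equiv track=rewrite | github.com/NiclasIrsbol/Bachelorprojekt---Nature-inspired-Optimization-Metaheuristics | backend/optimization_framework/problems/leadingones.py | fitnessLeadingOnes
-- ===== SOURCE A (Python) =====
-- def fitnessLeadingOnes(bitstring):
--     fitness = 0
--     for i in range(len(bitstring)):
--         if (bitstring[i] == "1"):
--             fitness +=1
--         else:
--             break
--     return fitness
-- ===== SOURCE B (Python) =====
-- def fitnessLeadingOnes(bitstring):
--     # Binary search for the largest k with bitstring[:k] == '1' * k.
--     # Correct because "the prefix of length k is all ones" is monotone:
--     # true for every k up to the leading-ones count, false beyond it.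
--     lo, hi = 0, len(bitstring)
--     while lo < hi:
--         mid = (lo + hi + 1) // 2
--         if bitstring[:mid] == '1' * mid:
--             lo = mid
--         else:
--             hi = mid - 1
--     return lo
-- ===== Notes on version B (the rewrite author's own statement) =====
-- stated objective: alternative
-- what changed: Replaces A's left-to-right scan with accumulator and break by a binary search on the prefix length, exploiting that the all-ones-prefix property is monotone in the prefix length.
import Mathlib
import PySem

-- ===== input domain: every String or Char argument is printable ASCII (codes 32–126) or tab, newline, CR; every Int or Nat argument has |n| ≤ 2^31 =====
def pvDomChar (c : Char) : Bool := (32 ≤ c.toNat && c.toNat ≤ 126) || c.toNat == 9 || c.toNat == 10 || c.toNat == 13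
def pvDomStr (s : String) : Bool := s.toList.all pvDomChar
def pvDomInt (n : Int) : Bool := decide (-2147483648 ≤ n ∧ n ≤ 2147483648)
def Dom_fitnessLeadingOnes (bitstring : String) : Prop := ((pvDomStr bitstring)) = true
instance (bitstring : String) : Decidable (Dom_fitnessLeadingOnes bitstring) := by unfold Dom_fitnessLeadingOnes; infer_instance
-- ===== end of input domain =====

-- B replaces A's linear scan-with-break by a binary search on the prefix length
-- (largest k with bitstring[:k] == '1'*k); objective: alternative algorithm.

-- ===== PORT A =====
-- A's for-loop over indices 0..len-1 with break: iterating bitstring[i] in order is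
-- iterating the characters in order; the accumulator `fitness` and the break are kept.
def fitnessLeadingOnesLoop : List Char → Int → Int
  | [], fitness => fitness
  | c :: rest, fitness =>
      if c == '1' then fitnessLeadingOnesLoop rest (fitness + 1)
      else fitness

def fitnessLeadingOnes (bitstring : String) : Int :=
  fitnessLeadingOnesLoop bitstring.toList 0

-- ===== PORT B =====
-- B's while loop: each iteration tests bitstring[:mid] == '1'*mid ('1'*mid ported as
-- List.replicate mid.toNat '1', exact also for mid ≤ 0 where Python gives '').
-- The fuel argument (hi - lo at entry, strictly decreasing) only makes the loop total.
def fitnessLeadingOnesBS : Nat → List Char → Int → Int → Int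
  | 0, _, lo, _ => lo
  | fuel + 1, cs, lo, hi =>
      if lo < hi then
        let mid := PySem.Int.floordiv (lo + hi + 1) 2
        if PySem.List.slice cs none (some mid) = List.replicate mid.toNat '1' then
          fitnessLeadingOnesBS fuel cs mid hi
        else
          fitnessLeadingOnesBS fuel cs lo (mid - 1)
      else lo

def fitnessLeadingOnes_alt (bitstring : String) : Int :=
  fitnessLeadingOnesBS (PySem.Str.len bitstring).toNat bitstring.toList 0
    (PySem.Str.len bitstring)

-- ===== PRECONDITION & SPEC =====
def Spec_fitnessLeadingOnes (bitstring : String) (out : Int) : Prop := out = fitnessLeadingOnes_alt bitstring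
instance (bitstring : String) (out : Int) : Decidable (Spec_fitnessLeadingOnes bitstring out) := by unfold Spec_fitnessLeadingOnes; infer_instance

-- ===== CLAIM (what is proved, stated in full; the proofs are below) =====
def Claim_equal_fitnessLeadingOnes : Prop := ∀ (bitstring : String), Dom_fitnessLeadingOnes bitstring → Spec_fitnessLeadingOnes bitstring (fitnessLeadingOnes bitstring)

-- ===== LEMMAS AND PROOFS =====
-- midpoint bounds of (lo+hi+1)//2, needed for the loop's termination
theorem pvMidBounds {lo hi : Int} (h : lo < hi) :
    lo < PySem.Int.floordiv (lo + hi + 1) 2 ∧ PySem.Int.floordiv (lo + hi + 1) 2 ≤ hi := by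
  constructor
  · have := (PySem.Int.le_floordiv_iff_mul_le (a := lo + hi + 1) (b := 2) (q := lo + 1)
      (by omega)).mpr (by omega)
    omega
  · have := (PySem.Int.floordiv_lt_iff_lt_mul (a := lo + hi + 1) (b := 2) (q := hi + 1)
      (by omega)).mpr (by omega)
    omega

-- A's loop computes the length of the maximal all-'1' prefix
theorem loop_eq_takeWhile (cs : List Char) (f : Int) :
    fitnessLeadingOnesLoop cs f = f + ((cs.takeWhile (· == '1')).length : Int) := by
  induction cs generalizing f with
  | nil => simp [fitnessLeadingOnesLoop, List.takeWhile]
  | cons c rest ih =>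
    by_cases h : c == '1'
    · simp [fitnessLeadingOnesLoop, h, List.takeWhile, ih]; omega
    · simp [fitnessLeadingOnesLoop, h, List.takeWhile]

-- the prefix of length m is all ones iff m ≤ leading-ones count (for m ≤ length)
theorem take_eq_replicate_iff (cs : List Char) :
    ∀ m : Nat, m ≤ cs.length →
      (cs.take m = List.replicate m '1' ↔ m ≤ (cs.takeWhile (· == '1')).length) := by
  induction cs with
  | nil =>
    intro m hm
    have hm0 : m = 0 := Nat.le_zero.mp (by simpa using hm)
    subst hm0; simp
  | cons c rest ih =>
    intro m hm
    cases m with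
    | zero => simp
    | succ k =>
      have hih := ih k (by simpa using hm)
      by_cases h : c = '1'
      · subst h
        simp only [List.take_succ_cons, List.replicate_succ, List.takeWhile, beq_self_eq_true,
          List.length_cons, List.cons.injEq, true_and, hih]
        omega
      · have hb : (c == '1') = false := by simpa using h
        simp [List.takeWhile, hb, List.replicate_succ, h]

-- the binary-search loop converges to the leading-ones count
theorem bs_eq (cs : List Char) :
    ∀ (fuel : Nat) (lo hi : Int), (hi - lo).toNat ≤ fuel →
      0 ≤ lo → lo ≤ ((cs.takeWhile (· == '1')).length : Int) →
      ((cs.takeWhile (· == '1')).length : Int) ≤ hi → hi ≤ (cs.length : Int) →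
      fitnessLeadingOnesBS fuel cs lo hi = ((cs.takeWhile (· == '1')).length : Int) := by
  intro fuel
  induction fuel with
  | zero => intro lo hi hf h0 hlo hhi hlen; simp [fitnessLeadingOnesBS]; omega
  | succ n ih =>
    intro lo hi hf h0 hlo hhi hlen
    unfold fitnessLeadingOnesBS
    by_cases h : lo < hi
    · simp only [if_pos h]
      have hb := pvMidBounds h
      set mid := PySem.Int.floordiv (lo + hi + 1) 2 with hm
      have hmid0 : 0 ≤ mid := by omega
      have hmidlen : mid.toNat ≤ cs.length := by omega
      rw [PySem.List.slice_to cs hmid0]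
      by_cases hc : cs.take mid.toNat = List.replicate mid.toNat '1'
      · rw [if_pos hc]
        have hle : mid ≤ ((cs.takeWhile (· == '1')).length : Int) := by
          have := (take_eq_replicate_iff cs mid.toNat hmidlen).mp hc
          omega
        exact ih mid hi (by omega) (by omega) hle hhi hlen
      · rw [if_neg hc]
        have hgt : ((cs.takeWhile (· == '1')).length : Int) < mid := by
          by_contra hcon
          exact hc ((take_eq_replicate_iff cs mid.toNat hmidlen).mpr (by omega))
        exact ih lo (mid - 1) (by omega) h0 hlo (by omega) (by omega)
    · simp only [if_neg h]; omega

-- ===== VERDICT (by name: the statement is the Claim_ definition above) =====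
theorem fitnessLeadingOnes_spec : Claim_equal_fitnessLeadingOnes := by
  intro s _
  unfold Spec_fitnessLeadingOnes fitnessLeadingOnes fitnessLeadingOnes_alt
  rw [loop_eq_takeWhile, PySem.Str.len_eq,
      bs_eq s.toList (s.toList.length : Int).toNat 0 (s.toList.length : Int) (by omega) (by omega)
        (by exact_mod_cast Nat.zero_le _)
        (by exact_mod_cast (List.takeWhile_prefix _).length_le) (by omega)]
  omega
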